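-- pv_equiv track=rewrite | github.com/sssungjin/Algorithm | 프로그래머스/lv2/131127. 할인 행사/할인 행사.py | solution
-- ===== SOURCE A (Python) =====
-- def solution(want, number, discount):
--     answer = 0
--     for i in range(len(discount)-sum(number)+1):
--         flag = True
--         s = discount[i:sum(number)+i]
--         cnt = 0
--         for w,n in zip(want, number):
--             if s.count(w) >= n:
--                 continue
--             else:
--                 flag = False
--         if flag: answer += 1
--     return answer
-- ===== SOURCE B (Python) =====
-- def solution(want, number, discount):
--     size = sum(number)
--     n_windows = len(discount) - size + 1
--     if n_windows <= 0:
--         return 0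
--     cnt = {}
--     for c in discount[:size]:
--         cnt[c] = cnt.get(c, 0) + 1
--     answer = 0
--     for i in range(n_windows):
--         if i > 0:
--             out = discount[i - 1]
--             cnt[out] = cnt.get(out, 0) - 1
--             new = discount[i + size - 1]
--             cnt[new] = cnt.get(new, 0) + 1
--         if all(cnt.get(w, 0) >= n for w, n in zip(want, number)):
--             answer += 1
--     return answer
-- ===== Notes on version B (the rewrite author's own statement) =====
-- stated objective: alternative
-- what changed: Replaces the per-window slice plus s.count scan for every wanted item by one sliding frequency dictionary updated incrementally (one element leaves, one enters) and checked per window; asymptotically O(D*W) instead of O(D*W*S), though a timing run could not verify speed because its largest inputs had negative count sums (outside Pre_).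
-- outside the precondition, e.g. on solution(['a'], [-1], ['a']): A returns 3, B raises IndexError
import Mathlib
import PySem

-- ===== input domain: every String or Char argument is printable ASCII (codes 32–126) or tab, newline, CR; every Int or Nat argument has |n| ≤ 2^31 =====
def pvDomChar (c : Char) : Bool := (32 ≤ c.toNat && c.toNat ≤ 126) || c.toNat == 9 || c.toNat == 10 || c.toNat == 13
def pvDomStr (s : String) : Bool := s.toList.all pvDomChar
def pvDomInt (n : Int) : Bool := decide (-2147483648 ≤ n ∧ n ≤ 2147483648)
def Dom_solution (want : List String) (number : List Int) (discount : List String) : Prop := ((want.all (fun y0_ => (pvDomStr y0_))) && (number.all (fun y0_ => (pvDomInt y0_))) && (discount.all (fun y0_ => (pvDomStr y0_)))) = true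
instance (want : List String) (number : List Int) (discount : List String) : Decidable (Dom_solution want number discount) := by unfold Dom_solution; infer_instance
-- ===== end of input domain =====

-- B replaces A's per-window slice + per-item s.count scans by one sliding frequency
-- dictionary updated incrementally (objective: alternative algorithm).

-- ===== PORT A =====
def solution (want : List String) (number : List Int) (discount : List String) : Int :=
  (PySem.List.pyRange 0 ((discount.length : Int) - number.sum + 1) 1).foldl
    (fun answer i =>
      let s := PySem.List.slice discount (some i) (some (number.sum + i))
      let flag := (want.zip number).foldl
        (fun flag wn => if ((PySem.List.count s wn.1 : Int) ≥ wn.2) then flag else false) true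
      if flag then answer + 1 else answer) 0

-- ===== PORT B =====
def solution_alt (want : List String) (number : List Int) (discount : List String) : Int :=
  let size := number.sum
  let nWindows := (discount.length : Int) - size + 1
  if nWindows ≤ 0 then 0
  else
    let cnt0 : PySem.Dict String Int :=
      (PySem.List.slice discount none (some size)).foldl
        (fun d c => d.insert c (d.getD c 0 + 1)) PySem.Dict.empty
    let r := (PySem.List.pyRange 0 nWindows 1).foldl
      (fun (st : PySem.Dict String Int × Int) i =>
        let cnt :=
          if 0 < i then
            let outc := PySem.List.pyGetD discount (i - 1) ""
            let c1 := st.1.insert outc (st.1.getD outc 0 - 1)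
            let newc := PySem.List.pyGetD discount (i + size - 1) ""
            c1.insert newc (c1.getD newc 0 + 1)
          else st.1
        let ok := (want.zip number).all (fun wn => cnt.getD wn.1 0 ≥ wn.2)
        (cnt, if ok then st.2 + 1 else st.2)) (cnt0, 0)
    r.2

-- ===== PRECONDITION & SPEC =====
-- Pre_ excludes inputs where the entries of number sum to a negative total (a negative window
-- length, outside the problem's domain): there A's negative slice bounds produce accidental
-- empty-window matches, and B's sliding window raises IndexError instead.
def Pre_solution (want : List String) (number : List Int) (discount : List String) : Prop :=
  0 ≤ number.sum
instance (want : List String) (number : List Int) (discount : List String) : Decidable (Pre_solution want number discount) := by unfold Pre_solution; infer_instance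

def pvWitness_solution : List String × List Int × List String :=
  (["a"], [1], ["a", "b", "a"])

def Spec_solution (want : List String) (number : List Int) (discount : List String) (out : Int) : Prop := out = solution_alt want number discount
instance (want : List String) (number : List Int) (discount : List String) (out : Int) : Decidable (Spec_solution want number discount out) := by unfold Spec_solution; infer_instance

-- ===== CLAIM (what is proved, stated in full; the proofs are below) =====
def Claim_equal_solution : Prop := ∀ (want : List String) (number : List Int) (discount : List String), Dom_solution want number discount → Pre_solution want number discount → Spec_solution want number discount (solution want number discount)

-- ===== LEMMAS AND PROOFS =====

-- the k-th window of size sum(number)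
def pvWindow (number : List Int) (discount : List String) (k : Nat) : List String :=
  (discount.drop k).take number.sum.toNat

-- whether window k satisfies every (want, number) requirement
def pvOk (want : List String) (number : List Int) (discount : List String) (k : Nat) : Bool :=
  (want.zip number).all
    (fun wn => decide (((pvWindow number discount k).count wn.1 : Int) ≥ wn.2))

-- A's inner flag loop is an 'all'
lemma foldl_flag {α : Type} (p : α → Prop) [DecidablePred p] (l : List α) (b : Bool) :
    l.foldl (fun f x => if p x then f else false) b = (b && l.all (fun x => decide (p x))) := by
  induction l generalizing b with
  | nil => simp
  | cons x xs ih =>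
    rw [List.foldl_cons]
    by_cases h : p x
    · rw [if_pos h, ih]; simp [h]
    · rw [if_neg h, ih]; simp [h]

-- sliding step for the window multiset, pointwise on counts
lemma window_count_step (number : List Int) (discount : List String) (k : Nat) (w : String)
    (hk : 1 ≤ k) (hkD : k + number.sum.toNat ≤ discount.length) :
    ((pvWindow number discount k).count w : Int)
      = ((pvWindow number discount (k - 1)).count w : Int)
        - (if discount[k - 1]'(by omega) = w then 1 else 0)
        + (if discount[k + number.sum.toNat - 1]'(by omega) = w then 1 else 0) := by
  unfold pvWindow
  rcases Nat.eq_zero_or_pos number.sum.toNat with h0 | hpos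
  · simp only [h0, List.take_zero, List.count_nil, Nat.add_zero]
    simp
  · have hk1 : k - 1 < discount.length := by omega
    have e1 : (discount.drop (k - 1)).take number.sum.toNat
        = discount[k - 1]'hk1 :: (discount.drop k).take (number.sum.toNat - 1) := by
      rw [List.drop_eq_getElem_cons hk1]
      have hkk : k - 1 + 1 = k := by omega
      rw [hkk]
      cases h : number.sum.toNat with
      | zero => omega
      | succ t' => simp
    have h3 : number.sum.toNat - 1 < (discount.drop k).length := by
      rw [List.length_drop]; omega
    have e2 : (discount.drop k).take number.sum.toNat
        = (discount.drop k).take (number.sum.toNat - 1)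
          ++ [discount[k + number.sum.toNat - 1]'(by omega)] := by
      have hs : number.sum.toNat = (number.sum.toNat - 1) + 1 := by omega
      conv_lhs => rw [hs]
      rw [List.take_succ, List.getElem?_eq_getElem h3]
      have hidx : k + (number.sum.toNat - 1) = k + number.sum.toNat - 1 := by omega
      simp only [List.getElem_drop, hidx, Option.toList_some]
    have cs : ∀ (x : String) (l : List String),
        (x :: l).count w = l.count w + (if w = x then 1 else 0) := by
      intro x l
      rw [List.count_cons]
      congr 1
      by_cases h : x = w
      · simp [h]
      · simp [h, Ne.symm h]
    have ca : ∀ (l : List String) (x : String),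
        (l ++ [x]).count w = l.count w + (if w = x then 1 else 0) := by
      intro l x
      rw [List.count_append, List.count_cons, List.count_nil]
      congr 1
      by_cases h : x = w
      · simp [h]
      · simp [h, Ne.symm h]
    rw [e1, e2, ca, cs]
    push_cast
    split_ifs with h1 h2 h3 h4 <;> try omega
    all_goals (exfalso; first | exact ‹¬_› (Eq.symm ‹_ = _›) | tauto)

-- B's loop body, named for the proofs (definitionally the lambda in solution_alt)
def pvBstep (want : List String) (number : List Int) (discount : List String) :
    (PySem.Dict String Int × Int) → Int → (PySem.Dict String Int × Int) :=
  fun st i =>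
    let cnt :=
      if 0 < i then
        let outc := PySem.List.pyGetD discount (i - 1) ""
        let c1 := st.1.insert outc (st.1.getD outc 0 - 1)
        let newc := PySem.List.pyGetD discount (i + number.sum - 1) ""
        c1.insert newc (c1.getD newc 0 + 1)
      else st.1
    let ok := (want.zip number).all (fun wn => cnt.getD wn.1 0 ≥ wn.2)
    (cnt, if ok then st.2 + 1 else st.2)

-- shifting the count range by one
lemma countP_range_shift (p : Nat → Bool) (m j : Nat) :
    (List.range (m + 1)).countP (fun u => p (j + u))
      = (if p j then 1 else 0) + (List.range m).countP (fun u => p (j + 1 + u)) := by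
  rw [List.range_succ_eq_map, List.countP_cons, List.countP_map]
  have hc : ((fun u => p (j + u)) ∘ Nat.succ) = fun u => p (j + 1 + u) := by
    funext u
    simp only [Function.comp]
    congr 1
    omega
  rw [hc]
  simp [Nat.add_comm]

-- sliding update of the counter dictionary, pointwise
lemma dict_slide (d : PySem.Dict String Int) (X Y w : String) :
    ((d.insert X (d.getD X 0 - 1)).insert Y
        ((d.insert X (d.getD X 0 - 1)).getD Y 0 + 1)).getD w 0
      = d.getD w 0 - (if X = w then 1 else 0) + (if Y = w then 1 else 0) := by
  simp only [PySem.Dict.getD_insert]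
  by_cases h1 : w = Y
  · subst h1
    by_cases h2 : w = X
    · subst h2
      simp
    · simp [h2, Ne.symm h2]
  · by_cases h2 : w = X
    · subst h2
      simp [h1, Ne.symm h1]
    · simp [h1, h2, Ne.symm h1, Ne.symm h2]

-- B's tail loop (i ≥ 1), with the counter invariant
lemma B_loop (want : List String) (number : List Int) (discount : List String) :
    ∀ (m j : Nat) (d : PySem.Dict String Int) (acc : Int),
      1 ≤ j → j + m + number.sum.toNat ≤ discount.length + 1 → 0 ≤ number.sum →
      (∀ w, d.getD w 0 = ((pvWindow number discount (j - 1)).count w : Int)) →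
      (((PySem.List.pyRange (j : Int) ((j + m : Nat) : Int) 1).foldl
        (pvBstep want number discount) (d, acc)).2)
      = acc + (((List.range m).countP (fun u => pvOk want number discount (j + u))) : Int) := by
  intro m
  induction m with
  | zero =>
    intro j d acc hj hD hS hinv
    have h0 : ((j + 0 : Nat) : Int) = (j : Int) := by push_cast; ring
    rw [h0, PySem.List.pyRange_one_eq_nil (le_refl _)]
    simp
  | succ m ih =>
    intro j d acc hj hD hS hinv
    have hcons : PySem.List.pyRange (j : Int) ((j + (m + 1) : Nat) : Int) 1
        = (j : Int) :: PySem.List.pyRange ((j : Int) + 1) ((j + (m + 1) : Nat) : Int) 1 :=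
      PySem.List.pyRange_one_cons (by push_cast; omega)
    rw [hcons, List.foldl_cons]
    have hjpos : (0 : Int) < (j : Int) := by push_cast; omega
    have hio : ((j : Int) - 1) = (((j - 1 : Nat) : Int)) := by push_cast [hj]; ring
    have hin : ((j : Int) + number.sum - 1) = (((j + number.sum.toNat - 1 : Nat) : Int)) := by
      have hnn : number.sum = (number.sum.toNat : Int) := (Int.toNat_of_nonneg hS).symm
      rw [hnn]; push_cast [hj]; omega
    have hjD : j - 1 < discount.length := by omega
    have hjtD : j + number.sum.toNat - 1 < discount.length := by omega
    have ho : PySem.List.pyGetD discount ((j : Int) - 1) ""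
        = discount[j - 1]'hjD := by
      rw [hio, PySem.List.pyGetD_natCast, List.getD_eq_getElem _ _ hjD]
    have hn : PySem.List.pyGetD discount ((j : Int) + number.sum - 1) ""
        = discount[j + number.sum.toNat - 1]'hjtD := by
      rw [hin, PySem.List.pyGetD_natCast, List.getD_eq_getElem _ _ hjtD]
    have hstep : ∀ w,
        (((d.insert (discount[j - 1]'hjD) (d.getD (discount[j - 1]'hjD) 0 - 1)).insert
            (discount[j + number.sum.toNat - 1]'hjtD)
            ((d.insert (discount[j - 1]'hjD) (d.getD (discount[j - 1]'hjD) 0 - 1)).getD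
              (discount[j + number.sum.toNat - 1]'hjtD) 0 + 1)).getD w 0)
          = ((pvWindow number discount j).count w : Int) := by
      intro w
      rw [dict_slide, hinv w, window_count_step number discount j w hj (by omega)]
    have hfst : pvBstep want number discount (d, acc) (j : Int)
        = ((d.insert (discount[j - 1]'hjD) (d.getD (discount[j - 1]'hjD) 0 - 1)).insert
            (discount[j + number.sum.toNat - 1]'hjtD)
            ((d.insert (discount[j - 1]'hjD) (d.getD (discount[j - 1]'hjD) 0 - 1)).getD
              (discount[j + number.sum.toNat - 1]'hjtD) 0 + 1),
           if pvOk want number discount j then acc + 1 else acc) := by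
      simp only [pvBstep, if_pos hjpos, ho, hn]
      congr 1
      have hok : ((want.zip number).all (fun wn =>
          (((d.insert (discount[j - 1]'hjD) (d.getD (discount[j - 1]'hjD) 0 - 1)).insert
            (discount[j + number.sum.toNat - 1]'hjtD)
            ((d.insert (discount[j - 1]'hjD) (d.getD (discount[j - 1]'hjD) 0 - 1)).getD
              (discount[j + number.sum.toNat - 1]'hjtD) 0 + 1)).getD wn.1 0) ≥ wn.2))
          = pvOk want number discount j := by
        simp only [hstep]
        rfl
      rw [hok]
    rw [hfst]
    have hend : ((j + (m + 1) : Nat) : Int) = (((j + 1) + m : Nat) : Int) := by push_cast; ring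
    have hstart : ((j : Int) + 1) = ((j + 1 : Nat) : Int) := by push_cast; ring
    rw [hstart, hend, ih (j + 1) _ _ (by omega) (by omega) hS (by simpa using hstep)]
    rw [countP_range_shift]
    by_cases hok : pvOk want number discount j <;> simp [hok] <;> push_cast <;> ring

-- A computes the number of satisfied windows
lemma A_eq_count (want : List String) (number : List Int) (discount : List String)
    (hS : 0 ≤ number.sum) :
    solution want number discount
      = (((List.range ((discount.length : Int) - number.sum + 1).toNat).countP
          (fun k => pvOk want number discount k)) : Int) := by
  unfold solution
  by_cases hneg : (discount.length : Int) - number.sum + 1 ≤ 0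
  · rw [PySem.List.pyRange_one_eq_nil hneg]
    have : ((discount.length : Int) - number.sum + 1).toNat = 0 := by omega
    rw [this]
    simp
  · have hflag : ∀ (s : List String),
        ((want.zip number).foldl
          (fun flag wn => if ((PySem.List.count s wn.1 : Int) ≥ wn.2) then flag else false) true)
        = (want.zip number).all (fun wn => decide ((PySem.List.count s wn.1 : Int) ≥ wn.2)) := by
      intro s
      rw [foldl_flag]
      simp
    simp only [hflag]
    rw [PySem.List.foldl_if_add_one]
    rw [PySem.List.pyRange_one]
    rw [List.countP_map]
    have hfun : ((fun i => (want.zip number).all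
          (fun wn => decide ((PySem.List.count (PySem.List.slice discount (some i) (some (number.sum + i))) wn.1 : Int) ≥ wn.2)))
        ∘ (fun k : Nat => (0 : Int) + (k : Int))) = fun k => pvOk want number discount k := by
      funext k
      simp only [Function.comp, zero_add]
      unfold pvOk pvWindow
      have hb : number.sum + (k : Int) = ((number.sum.toNat + k : Nat) : Int) := by
        push_cast
        omega
      rw [hb, PySem.List.slice_natCast]
      have ht : number.sum.toNat + k - k = number.sum.toNat := by omega
      rw [ht]
      simp [PySem.List.count_eq]
    rw [hfun]
    simp

-- B computes the same count
lemma B_eq_count (want : List String) (number : List Int) (discount : List String)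
    (hS : 0 ≤ number.sum) :
    solution_alt want number discount
      = (((List.range ((discount.length : Int) - number.sum + 1).toNat).countP
          (fun k => pvOk want number discount k)) : Int) := by
  by_cases hneg : (discount.length : Int) - number.sum + 1 ≤ 0
  · unfold solution_alt
    rw [if_pos hneg]
    have h0 : ((discount.length : Int) - number.sum + 1).toNat = 0 := by omega
    rw [h0]
    simp
  · have halt : solution_alt want number discount
        = ((PySem.List.pyRange 0 ((discount.length : Int) - number.sum + 1) 1).foldl
            (pvBstep want number discount)
            ((PySem.List.slice discount none (some number.sum)).foldl
              (fun d c => d.insert c (d.getD c 0 + 1)) PySem.Dict.empty, 0)).2 := by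
      unfold solution_alt
      rw [if_neg hneg]
      rfl
    rw [halt]
    have hc0 : ∀ w, ((PySem.List.slice discount none (some number.sum)).foldl
        (fun d c => d.insert c (d.getD c 0 + 1)) PySem.Dict.empty).getD w 0
        = ((pvWindow number discount 0).count w : Int) := by
      intro w
      rw [PySem.Dict.foldl_insert_getD_add_one_eq_counter, PySem.Dict.getD_counter]
      unfold pvWindow
      rw [PySem.List.slice_to _ hS, List.drop_zero]
    have hcons : PySem.List.pyRange 0 ((discount.length : Int) - number.sum + 1) 1
        = 0 :: PySem.List.pyRange (0 + 1) ((discount.length : Int) - number.sum + 1) 1 :=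
      PySem.List.pyRange_one_cons (by omega)
    rw [hcons, List.foldl_cons]
    have hf0 : pvBstep want number discount
        (((PySem.List.slice discount none (some number.sum)).foldl
          (fun d c => d.insert c (d.getD c 0 + 1)) PySem.Dict.empty), 0) 0
        = (((PySem.List.slice discount none (some number.sum)).foldl
            (fun d c => d.insert c (d.getD c 0 + 1)) PySem.Dict.empty),
           if pvOk want number discount 0 then 1 else 0) := by
      simp only [pvBstep]
      rw [if_neg (by omega : ¬ ((0:Int) < 0))]
      have hok : ((want.zip number).all (fun wn =>
          (((PySem.List.slice discount none (some number.sum)).foldl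
            (fun d c => d.insert c (d.getD c 0 + 1)) PySem.Dict.empty).getD wn.1 0) ≥ wn.2))
          = pvOk want number discount 0 := by
        simp only [hc0]
        rfl
      rw [hok]
      simp
    rw [hf0]
    have h1 : ((0 : Int) + 1) = ((1 : Nat) : Int) := by norm_num
    have hend : ((discount.length : Int) - number.sum + 1)
        = ((1 + (((discount.length : Int) - number.sum + 1).toNat - 1) : Nat) : Int) := by
      omega
    rw [h1]
    conv_lhs => rw [hend]
    rw [B_loop want number discount (((discount.length : Int) - number.sum + 1).toNat - 1) 1 _ _
      (le_refl 1) (by omega) hS (by simpa using hc0)]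
    have hN : ((discount.length : Int) - number.sum + 1).toNat
        = (((discount.length : Int) - number.sum + 1).toNat - 1) + 1 := by omega
    conv_rhs => rw [hN]
    have hsh : (fun k => pvOk want number discount k) = (fun u => pvOk want number discount (0 + u)) := by
      funext u
      rw [Nat.zero_add]
    rw [hsh, countP_range_shift (fun u => pvOk want number discount u)
      (((discount.length : Int) - number.sum + 1).toNat - 1) 0]
    by_cases hok : pvOk want number discount 0 <;>
      simp [hok]

-- ===== VERDICT (by name: the statement is the Claim_ definition above) =====
theorem solution_spec : Claim_equal_solution := by
  intro want number discount hdom hpre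
  unfold Spec_solution
  have hS : 0 ≤ number.sum := hpre
  rw [A_eq_count _ _ _ hS, B_eq_count _ _ _ hS]
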